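-- pv_equiv track=rewrite | github.com/Braisrg5/ProjectEuler | solutions/problem_051.py | create_masks_v2
-- ===== SOURCE A (Python) =====
-- from itertools import combinations
-- from collections import Counter
--
-- def bit_strings(digits, subs):
--     '''https://stackoverflow.com/a/63100745
--     Generates all combinations with  strings of length n'''
--     # List of the indexes of the digits to be replaced
--     index_combinations = combinations(range(digits), subs)
--     for indices in index_combinations:
--         yield ''.join('*' if i in indices else 'X' for i in range(digits))
--
-- def create_masks_v2(str_prime):
--     '''Creates all possible masks for a given prime number.'''
--     digits = len(str_prime)
--     # Masks if we replace just one digit: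
--     masks1 = bit_strings(digits, 1)
--     for mask in masks1:
--         yield mask
--
--     count_digits = Counter(str_prime)
--     # Masks if we replace more than one digit:
--     if len(count_digits) > 1:
--         for digit, count in count_digits.items():
--             if count <= 1:
--                 continue
--             for i in range(1, count+1):
--                 for temp_mask in bit_strings(count, i):
--                     mask, temp_index = '', 0
--                     for dig in str_prime:
--                         if dig == digit:
--                             mask += temp_mask[temp_index]
--                             temp_index += 1
--                         else:
--                             mask += 'X'
--                     yield mask
-- ===== SOURCE B (Python) =====
-- def _emit(seq, digit, budget):
--     '''Recursively walks seq, yielding every mask that stars exactly `budget`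
--     occurrences of `digit`, choosing '*' before 'X' at each occurrence
--     (which is index-lexicographic order).'''
--     if not seq:
--         if budget == 0:
--             yield ''
--         return
--     head, rest = seq[0], seq[1:]
--     if head == digit and budget > 0:
--         for tail in _emit(rest, digit, budget - 1):
--             yield '*' + tail
--     for tail in _emit(rest, digit, budget):
--         yield 'X' + tail
--
-- def create_masks_v2(str_prime):
--     '''Creates all possible masks for a given prime number.'''
--     digits = len(str_prime)
--     for pos in range(digits):
--         yield 'X' * pos + '*' + 'X' * (digits - pos - 1)
--     seen = []
--     for ch in str_prime:
--         if ch not in seen: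
--             seen.append(ch)
--     if len(seen) > 1:
--         for digit in seen:
--             count = sum(c == digit for c in str_prime)
--             if count > 1:
--                 for i in range(1, count + 1):
--                     yield from _emit(str_prime, digit, i)
-- ===== Notes on version B (the rewrite author's own statement) =====
-- stated objective: alternative
-- what changed: B drops the bit_strings index-combination enumeration and the relative-mask splice entirely: multi-star masks come from a recursive walk over the string with a star budget that branches at each occurrence of the digit (star branch first = index-lexicographic order), single-star masks from string slicing, and the digit order from a plain first-occurrence dedup list instead of Counter.
import Mathlib
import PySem

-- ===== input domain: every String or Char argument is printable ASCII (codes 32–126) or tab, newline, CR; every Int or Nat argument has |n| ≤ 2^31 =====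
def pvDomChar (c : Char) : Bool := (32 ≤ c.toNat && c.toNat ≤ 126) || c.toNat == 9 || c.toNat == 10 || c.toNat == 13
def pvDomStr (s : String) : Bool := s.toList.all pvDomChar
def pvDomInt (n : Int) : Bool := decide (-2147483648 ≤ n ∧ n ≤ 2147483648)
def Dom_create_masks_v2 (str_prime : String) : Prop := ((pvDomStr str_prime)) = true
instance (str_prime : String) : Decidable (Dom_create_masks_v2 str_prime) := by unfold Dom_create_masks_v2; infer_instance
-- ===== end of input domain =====

-- B replaces A's index-combination enumeration and relative-mask splice by a recursive
-- walk over the string with a star budget, branching at each occurrence (objective: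
-- alternative). Both are Python generators; the equivalence is about the yielded sequence.

-- ===== PORT A =====
-- bit_strings(digits, subs): one mask per combination of `subs` indices (indices are Nat: Python's range values here are always ≥ 0)
def pv_bit_strings (digits subs : Nat) : List (List Char) :=
  (PySem.List.combinations (List.range digits) subs).map
    (fun indices => (List.range digits).map (fun i => if indices.contains i then '*' else 'X'))

def create_masks_v2 (str_prime : String) : List String :=
  let s := str_prime.toList
  let digits := s.length
  let masks1 := (pv_bit_strings digits 1).map String.ofList
  let count_digits := PySem.Dict.counter s
  masks1 ++
    (if 1 < count_digits.size then
      count_digits.items.flatMap (fun p =>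
        if p.2 ≤ 1 then []
        else (List.range' 1 p.2.toNat).flatMap (fun i =>
          (pv_bit_strings p.2.toNat i).map (fun temp_mask =>
            -- the inner for-loop over str_prime with state (mask, temp_index);
            -- temp_mask[temp_index] is always in range, the getD default is never used
            ((s.foldl (fun (st : List Char × Nat) dig =>
                if dig == p.1 then (st.1 ++ [temp_mask.getD st.2 ' '], st.2 + 1)
                else (st.1 ++ ['X'], st.2)) ([], 0)).1) |> String.ofList)))
    else [])

-- ===== PORT B =====
-- _emit(seq, digit, budget): recursive generator; strings are built by cons, String.ofList at the yield
def pvEmit (digit : Char) : List Char → Nat → List (List Char)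
  | [], b => if b = 0 then [[]] else []
  | x :: xs, b =>
      (if (x == digit) && decide (0 < b) then (pvEmit digit xs (b - 1)).map (fun t => '*' :: t)
       else [])
      ++ (pvEmit digit xs b).map (fun t => 'X' :: t)

def create_masks_v2_alt (str_prime : String) : List String :=
  let s := str_prime.toList
  let digits := s.length
  let masks1 := (List.range digits).map (fun pos =>
    String.ofList (List.replicate pos 'X' ++ '*' :: List.replicate (digits - pos - 1) 'X'))
  -- the `if ch not in seen: seen.append(ch)` loop is exactly PySem.Set.ofList
  let seen := PySem.Set.ofList s
  masks1 ++
    (if 1 < seen.length then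
      seen.flatMap (fun digit =>
        let count : Int := s.foldl (fun acc c => if c == digit then acc + 1 else acc) 0
        if 1 < count then
          (List.range' 1 count.toNat).flatMap (fun i => (pvEmit digit s i).map String.ofList)
        else [])
    else [])

-- ===== PRECONDITION & SPEC =====
def Spec_create_masks_v2 (str_prime : String) (out : List String) : Prop := out = create_masks_v2_alt str_prime
instance (str_prime : String) (out : List String) : Decidable (Spec_create_masks_v2 str_prime out) := by unfold Spec_create_masks_v2; infer_instance

-- ===== CLAIM (what is proved, stated in full; the proofs are below) =====
def Claim_equal_create_masks_v2 : Prop := ∀ (str_prime : String), Dom_create_masks_v2 str_prime → Spec_create_masks_v2 str_prime (create_masks_v2 str_prime)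

-- ===== LEMMAS AND PROOFS =====

-- the splice loop of A, as structural recursion on the remaining characters
def pvGo (dg : Char) (T : List Char) : List Char → Nat → List Char
  | [], _ => []
  | x :: xs, ti =>
    if x == dg then T.getD ti ' ' :: pvGo dg T xs (ti + 1) else 'X' :: pvGo dg T xs ti

-- the absolute mask that stars the occurrences of dg whose occurrence index is in rc
def pvMaskRel (dg : Char) (rc : List Nat) : List Char → Nat → List Char
  | [], _ => []
  | x :: xs, ti =>
    if x == dg then (if rc.contains ti then '*' else 'X') :: pvMaskRel dg rc xs (ti + 1)
    else 'X' :: pvMaskRel dg rc xs ti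

theorem pvSplice_foldl (dg : Char) (T : List Char) (s : List Char) :
    ∀ (m : List Char) (ti : Nat),
      (s.foldl (fun (st : List Char × Nat) dig =>
          if dig == dg then (st.1 ++ [T.getD st.2 ' '], st.2 + 1)
          else (st.1 ++ ['X'], st.2)) (m, ti)).1 = m ++ pvGo dg T s ti := by
  induction s with
  | nil => intro m ti; simp [pvGo]
  | cons x xs ih =>
    intro m ti
    simp only [List.foldl_cons, pvGo]
    by_cases hx : (x == dg) = true
    · simp only [hx, if_true]; rw [ih]; simp
    · simp only [hx]; rw [ih]; simp

theorem pvMaskRel_congr (dg : Char) (rc rc' : List Nat) (s : List Char) :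
    ∀ ti, (∀ j, ti ≤ j → rc.contains j = rc'.contains j) →
      pvMaskRel dg rc s ti = pvMaskRel dg rc' s ti := by
  induction s with
  | nil => intro ti _; rfl
  | cons x xs ih =>
    intro ti h
    simp only [pvMaskRel]
    by_cases hx : (x == dg) = true
    · simp only [hx, if_true, h ti le_rfl]
      exact congrArg _ (ih (ti + 1) (fun j hj => h j (by omega)))
    · simp only [hx, Bool.false_eq_true, if_false]
      exact congrArg _ (ih ti h)

theorem pvGo_eq_maskRel (dg : Char) (rc : List Nat) (c : Nat) :
    ∀ (s : List Char) (ti : Nat), ti + s.count dg ≤ c →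
      pvGo dg ((List.range c).map (fun j => if rc.contains j then '*' else 'X')) s ti
        = pvMaskRel dg rc s ti := by
  intro s
  induction s with
  | nil => intro ti _; rfl
  | cons x xs ih =>
    intro ti h
    simp only [pvGo, pvMaskRel]
    by_cases hx : (x == dg) = true
    · rw [List.count_cons, if_pos hx] at h
      have hti : ti < c := by omega
      simp only [hx, if_true,
        PySem.List.getD_map_range (fun j => if rc.contains j then '*' else 'X') c ti ' ' hti]
      exact congrArg _ (ih (ti + 1) (by omega))
    · rw [List.count_cons, if_neg hx] at h
      simp only [hx, Bool.false_eq_true, if_false]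
      exact congrArg _ (ih ti h)

theorem pvEmit_eq (dg : Char) :
    ∀ (s : List Char) (b ti : Nat),
      pvEmit dg s b
        = (PySem.List.combinations (List.range' ti (s.count dg)) b).map
            (fun rc => pvMaskRel dg rc s ti) := by
  intro s
  induction s with
  | nil =>
    intro b ti
    cases b with
    | zero => simp [pvEmit, PySem.List.combinations_zero, pvMaskRel]
    | succ k => simp [pvEmit, PySem.List.combinations_nil_succ]
  | cons x xs ih =>
    intro b ti
    by_cases hx : (x == dg) = true
    · rw [List.count_cons, if_pos hx, List.range'_succ]
      cases b with
      | zero =>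
        simp only [pvEmit, hx, Bool.true_and, decide_eq_true_eq,
          PySem.List.combinations_zero, List.map_cons, List.map_nil]
        simp only [lt_irrefl, if_false, List.nil_append]
        rw [ih 0 (ti + 1), PySem.List.combinations_zero]
        simp [pvMaskRel, hx]
      | succ k =>
        rw [PySem.List.combinations_cons_succ, List.map_append, List.map_map]
        simp only [pvEmit, hx, Bool.true_and]
        rw [if_pos (by simp), Nat.add_sub_cancel]
        congr 1
        · -- star branch ↔ combinations with ti chosen
          rw [ih k (ti + 1), List.map_map]
          apply List.map_congr_left
          intro rc' _
          simp only [Function.comp_apply, pvMaskRel, hx, if_true]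
          rw [List.contains_cons]
          simp only [BEq.rfl, Bool.true_or, if_true]
          refine congrArg _ (pvMaskRel_congr dg (ti :: rc') rc' xs (ti + 1) ?_).symm
          intro j hj
          rw [List.contains_cons]
          have : (j == ti) = false := by
            simp only [beq_eq_false_iff_ne, ne_eq]; omega
          rw [this, Bool.false_or]
        · -- X branch ↔ combinations with ti not chosen
          rw [ih (k + 1) (ti + 1), List.map_map]
          apply List.map_congr_left
          intro rc hrc
          have hsub : ∀ j ∈ rc, ti + 1 ≤ j := by
            intro j hj
            have hs := PySem.List.sublist_of_mem_combinations hrc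
            have := List.mem_range'_1.mp (hs.subset hj)
            omega
          simp only [Function.comp_apply, pvMaskRel, hx, if_true]
          have hcon : rc.contains ti = false := by
            rw [Bool.eq_false_iff]
            intro hy
            have := hsub ti (List.contains_iff_mem.mp hy)
            omega
          rw [hcon]
          simp
    · rw [List.count_cons, if_neg hx]
      simp only [pvEmit, hx, Bool.false_and, Bool.false_eq_true, if_false, List.nil_append]
      rw [ih b ti, List.map_map]
      apply List.map_congr_left
      intro rc _
      simp [Function.comp_apply, pvMaskRel, hx]

theorem pvMask1 (n pos : Nat) (h : pos < n) :
    (List.range n).map (fun i => if i == pos then '*' else 'X')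
      = List.replicate pos 'X' ++ '*' :: List.replicate (n - pos - 1) 'X' := by
  apply List.ext_getElem
  · simp; omega
  · intro i h1 h2
    simp only [List.getElem_map, List.getElem_range]
    rcases lt_trichotomy i pos with hlt | rfl | hgt
    · rw [List.getElem_append_left (by simpa using hlt)]
      simp [Nat.ne_of_lt hlt]
    · rw [List.getElem_append_right (by simp)]
      simp
    · rw [List.getElem_append_right (by simp; omega)]
      have : i - (List.replicate pos 'X').length ≠ 0 := by simp; omega
      rw [List.getElem_cons]
      simp only [this]
      simp [Nat.ne_of_gt hgt, List.getElem_replicate]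

-- ===== VERDICT (by name: the statement is the Claim_ definition above) =====
theorem create_masks_v2_spec : Claim_equal_create_masks_v2 := by
  intro str_prime _
  unfold Spec_create_masks_v2 create_masks_v2 create_masks_v2_alt pv_bit_strings
  set s := str_prime.toList with hs
  -- single-star masks
  have hmask1 : ((PySem.List.combinations (List.range s.length) 1).map
        (fun indices => (List.range s.length).map (fun i => if indices.contains i then '*' else 'X'))).map String.ofList
      = (List.range s.length).map (fun pos =>
          String.ofList (List.replicate pos 'X' ++ '*' :: List.replicate (s.length - pos - 1) 'X')) := by
    rw [PySem.List.combinations_one, List.map_map, List.map_map]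
    apply List.map_congr_left
    intro pos hpos
    simp only [Function.comp_apply]
    rw [← pvMask1 s.length pos (List.mem_range.mp hpos)]
    congr 1
    apply List.map_congr_left
    intro i _
    simp
  simp only [hmask1]
  congr 1
  simp only [PySem.Dict.size, PySem.Dict.items_counter, List.length_map]
  by_cases hlen : 1 < (PySem.Set.ofList s).length
  · rw [if_pos hlen, if_pos hlen]
    rw [List.flatMap_def, List.flatMap_def, List.map_map]
    apply congrArg List.flatten
    apply List.map_congr_left
    intro k _
    simp only [Function.comp_apply]
    -- B's occurrence count is s.count k
    rw [PySem.List.foldl_beq_add_one]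
    simp only [zero_add]
    by_cases hc : s.count k ≤ 1
    · rw [if_pos (by exact_mod_cast hc),
        if_neg (by intro hx; exact absurd (by exact_mod_cast hx) (not_lt.mpr hc))]
    · rw [if_neg (by intro hx; exact hc (by exact_mod_cast hx)),
        if_pos (by exact_mod_cast not_le.mp hc)]
      rw [Int.toNat_natCast]
      rw [List.flatMap_def, List.flatMap_def]
      apply congrArg List.flatten
      apply List.map_congr_left
      intro i _
      rw [pvEmit_eq k s i 0, ← List.range_eq_range']
      rw [List.map_map, List.map_map]
      apply List.map_congr_left
      intro rc _
      simp only [Function.comp_apply]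
      rw [pvSplice_foldl k _ s [] 0, List.nil_append]
      exact congrArg String.ofList
        (pvGo_eq_maskRel k rc (s.count k) s 0 (by omega))
  · rw [if_neg hlen, if_neg hlen]
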